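-- pv_equiv track=rewrite | github.com/JackywithaWhiteDog/Bridge-AI-with-Bidding-Information | bridge/bid_infer.py | fill_13
-- ===== SOURCE A (Python) =====
-- def fill_13(suit_db, num_cards):
--     suit = [i if i!=None else 0 for i in suit_db]
--     to_fill = [i for i in range(4) if suit_db[i] == None]
--     cnt = 0
--     mn=len(to_fill) if len(to_fill)!=0 else 4
--     # st()
--     while sum(suit)<num_cards:
--         if len(to_fill)!=0:
--             index = to_fill[cnt%mn]
--         else:
--             index = 0
--         suit[index] = suit[index] + 1
--         cnt+=1
--     while sum(suit)>num_cards: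
--         suit[-1] = suit[-1] - 1
--
--     return suit
-- ===== SOURCE B (Python) =====
-- def fill_13(suit_db, num_cards):
--     suit = [0 if x is None else x for x in suit_db]
--     to_fill = [i for i in range(4) if suit_db[i] is None]
--     need = num_cards - sum(suit)
--     if need > 0:
--         if to_fill:
--             q, r = divmod(need, len(to_fill))
--             for j, idx in enumerate(to_fill):
--                 suit[idx] += q + (1 if j < r else 0)
--         else:
--             suit[0] += need
--     elif need < 0:
--         suit[-1] += need
--     return suit
-- ===== Notes on version B (the rewrite author's own statement) =====
-- stated objective: faster
-- what changed: Replaces the two while-loops (one increment/decrement per iteration, recomputing sum(suit) each time) by a closed-form divmod distribution: need=num_cards-sum(suit) is split as q,r=divmod(need,len(to_fill)) with the first r slots getting one extra, and a deficit is subtracted from suit[-1] in one step.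
import Mathlib
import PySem

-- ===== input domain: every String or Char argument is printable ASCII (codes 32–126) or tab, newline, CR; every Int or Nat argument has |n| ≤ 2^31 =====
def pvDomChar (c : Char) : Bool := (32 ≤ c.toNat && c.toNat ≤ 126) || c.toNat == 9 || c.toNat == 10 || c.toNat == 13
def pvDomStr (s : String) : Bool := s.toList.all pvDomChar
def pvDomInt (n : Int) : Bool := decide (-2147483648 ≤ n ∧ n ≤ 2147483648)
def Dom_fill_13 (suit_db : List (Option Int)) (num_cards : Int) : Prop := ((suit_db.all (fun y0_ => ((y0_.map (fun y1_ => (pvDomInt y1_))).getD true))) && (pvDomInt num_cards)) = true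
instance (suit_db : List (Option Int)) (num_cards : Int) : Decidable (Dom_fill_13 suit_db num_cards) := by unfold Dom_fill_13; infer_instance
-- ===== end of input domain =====

-- B replaces A's one-card-at-a-time while-loops by a closed-form divmod distribution (measurably faster when |num_cards - sum| is large).

-- ===== PORT A =====

-- A's index expression: to_fill[cnt % mn] if to_fill is nonempty else 0
def pvIdx (to_fill : List Nat) (mn cnt : Nat) : Nat :=
  if to_fill ≠ [] then to_fill.getD (cnt % mn) 0 else 0

-- first while loop of A. The fuel argument only makes the loop total: it is the exact
-- number of iterations (each one raises sum(suit) by 1), the while condition is still tested.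
-- Out-of-range updates (where Python raises IndexError, excluded by Pre_) are no-ops of List.set.
def pvLoop1 (num_cards : Int) (to_fill : List Nat) (mn : Nat) : Nat → List Int → Nat → List Int
  | 0, suit, _ => suit
  | fuel + 1, suit, cnt =>
      if suit.sum < num_cards then
        pvLoop1 num_cards to_fill mn fuel
          (suit.set (pvIdx to_fill mn cnt) (suit.getD (pvIdx to_fill mn cnt) 0 + 1)) (cnt + 1)
      else suit

-- second while loop of A, same fuel discipline (each iteration lowers sum(suit) by 1)
def pvLoop2 (num_cards : Int) : Nat → List Int → List Int
  | 0, suit => suit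
  | fuel + 1, suit =>
      if num_cards < suit.sum then
        pvLoop2 num_cards fuel (suit.set (suit.length - 1) (suit.getD (suit.length - 1) 0 - 1))
      else suit

def fill_13 (suit_db : List (Option Int)) (num_cards : Int) : List Int :=
  let suit := suit_db.map (fun o => o.getD 0)
  let to_fill := (List.range 4).filter (fun i => (suit_db.getD i none).isNone)
  let mn := if to_fill.length ≠ 0 then to_fill.length else 4
  let suit1 := pvLoop1 num_cards to_fill mn (num_cards - suit.sum).toNat suit 0
  pvLoop2 num_cards (suit1.sum - num_cards).toNat suit1

-- ===== PORT B =====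

-- B's for-loop over enumerate(to_fill): pairs are (idx, j)
def pvDistribute (q r : Int) : List (Nat × Nat) → List Int → List Int
  | [], suit => suit
  | (idx, j) :: rest, suit =>
      pvDistribute q r rest (suit.set idx (suit.getD idx 0 + q + (if (j : Int) < r then 1 else 0)))

def fill_13_alt (suit_db : List (Option Int)) (num_cards : Int) : List Int :=
  let suit := suit_db.map (fun o => o.getD 0)
  let to_fill := (List.range 4).filter (fun i => (suit_db.getD i none).isNone)
  let need := num_cards - suit.sum
  if 0 < need then
    if to_fill ≠ [] then
      let q := PySem.Int.floordiv need (to_fill.length : Int)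
      let r := PySem.Int.mod need (to_fill.length : Int)
      pvDistribute q r to_fill.zipIdx suit
    else suit.set 0 (suit.getD 0 0 + need)
  else if need < 0 then
    suit.set (suit.length - 1) (suit.getD (suit.length - 1) 0 + need)
  else suit

-- ===== PRECONDITION & SPEC =====
-- Pre_ excludes exactly the inputs where A raises IndexError: suit_db[i] for i in range(4) needs length ≥ 4.
def Pre_fill_13 (suit_db : List (Option Int)) (num_cards : Int) : Prop := 4 ≤ suit_db.length
instance (suit_db : List (Option Int)) (num_cards : Int) : Decidable (Pre_fill_13 suit_db num_cards) := by unfold Pre_fill_13; infer_instance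

def pvWitness_fill_13 : List (Option Int) × Int := ([some 1, none, some 2, none], 13)

def Spec_fill_13 (suit_db : List (Option Int)) (num_cards : Int) (out : List Int) : Prop := out = fill_13_alt suit_db num_cards
instance (suit_db : List (Option Int)) (num_cards : Int) (out : List Int) : Decidable (Spec_fill_13 suit_db num_cards out) := by unfold Spec_fill_13; infer_instance

-- ===== CLAIM (what is proved, stated in full; the proofs are below) =====
def Claim_equal_fill_13 : Prop := ∀ (suit_db : List (Option Int)) (num_cards : Int), Dom_fill_13 suit_db num_cards → Pre_fill_13 suit_db num_cards → Spec_fill_13 suit_db num_cards (fill_13 suit_db num_cards)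

-- ===== LEMMAS AND PROOFS =====

-- sum changes by exactly one when a valid slot is incremented / decremented
theorem pv_sum_set_bump (l : List Int) (i : Nat) (h : i < l.length) :
    (l.set i (l.getD i 0 + 1)).sum = l.sum + 1 := by
  rw [List.sum_set']
  simp only [h, reduceDIte, List.getD_eq_getElem l 0 h]
  ring

theorem pv_sum_set_drop (l : List Int) (i : Nat) (h : i < l.length) :
    (l.set i (l.getD i 0 - 1)).sum = l.sum - 1 := by
  rw [List.sum_set']
  simp only [h, reduceDIte, List.getD_eq_getElem l 0 h]
  ring


-- loop bodies of A replayed for a counted number of steps / the step count per slot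
def pvIter (to_fill : List Nat) (mn : Nat) : List Int → Nat → Nat → List Int
  | l, _, 0 => l
  | l, cnt, k+1 =>
      pvIter to_fill mn (l.set (pvIdx to_fill mn cnt) (l.getD (pvIdx to_fill mn cnt) 0 + 1)) (cnt + 1) k

def pvCount (to_fill : List Nat) (mn : Nat) : Nat → Nat → Nat → Int
  | _, 0, _ => 0
  | cnt, k+1, j => (if pvIdx to_fill mn cnt = j then 1 else 0) + pvCount to_fill mn (cnt + 1) k j

theorem pv_getD_set_self (l : List Int) (i : Nat) (v : Int) (h : i < l.length) :
    (l.set i v).getD i 0 = v := by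
  rw [List.getD_eq_getElem _ 0 (by simpa using h)]
  simp [h]

theorem pv_getD_set_ne (l : List Int) (i j : Nat) (v : Int) (hne : i ≠ j) :
    (l.set i v).getD j 0 = l.getD j 0 := by
  by_cases hj : j < l.length
  · rw [List.getD_eq_getElem _ 0 (by simpa using hj), List.getD_eq_getElem _ 0 hj,
      List.getElem_set_ne hne]
  · rw [List.getD_eq_default _ 0 (by simpa using hj), List.getD_eq_default _ 0 (by omega)]

theorem pv_set_self (l : List Int) (i : Nat) (h : i < l.length) :
    l.set i (l.getD i 0) = l := by
  rw [List.getD_eq_getElem _ 0 h]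
  exact List.set_getElem_self ..

theorem pvIdx_lt (to_fill : List Nat) (mn cnt : Nat) (n : Nat)
    (htf : ∀ i ∈ to_fill, i < n) (hn : 0 < n)
    (hmn : to_fill ≠ [] → mn = to_fill.length) :
    pvIdx to_fill mn cnt < n := by
  unfold pvIdx
  by_cases he : to_fill = []
  · simp only [he, ne_eq, not_true_eq_false, if_false]; exact hn
  · have hm := hmn he
    have hlt : cnt % mn < to_fill.length := by
      rw [hm]; exact Nat.mod_lt _ (by cases to_fill with | nil => exact absurd rfl he | cons a t => simp)
    rw [if_pos he, List.getD_eq_getElem _ 0 hlt]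
    exact htf _ (List.getElem_mem hlt)

theorem pvLoop1_eq_iter (num_cards : Int) (to_fill : List Nat) (mn : Nat)
    (hmn : to_fill ≠ [] → mn = to_fill.length) :
    ∀ (k : Nat) (l : List Int) (cnt : Nat),
      (∀ i ∈ to_fill, i < l.length) → 0 < l.length → l.sum + k = num_cards →
      pvLoop1 num_cards to_fill mn k l cnt = pvIter to_fill mn l cnt k := by
  intro k
  induction k with
  | zero =>
      intro l cnt _ _ hsum
      rw [pvLoop1, pvIter]
  | succ k ih =>
      intro l cnt htf hlen hsum
      have hidx := pvIdx_lt to_fill mn cnt l.length htf hlen hmn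
      rw [pvLoop1, if_pos (by push_cast; omega), pvIter]
      exact ih _ _ (by simpa using htf) (by simpa using hlen)
        (by rw [pv_sum_set_bump _ _ hidx]; push_cast at hsum; omega)

theorem pvIter_length (to_fill : List Nat) (mn : Nat) :
    ∀ (k : Nat) (l : List Int) (cnt : Nat), (pvIter to_fill mn l cnt k).length = l.length := by
  intro k
  induction k with
  | zero => intro l cnt; rw [pvIter]
  | succ k ih => intro l cnt; rw [pvIter, ih]; simp

theorem pvIter_sum (to_fill : List Nat) (mn : Nat)
    (hmn : to_fill ≠ [] → mn = to_fill.length) :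
    ∀ (k : Nat) (l : List Int) (cnt : Nat),
      (∀ i ∈ to_fill, i < l.length) → 0 < l.length →
      (pvIter to_fill mn l cnt k).sum = l.sum + k := by
  intro k
  induction k with
  | zero => intro l cnt _ _; rw [pvIter]; simp
  | succ k ih =>
      intro l cnt htf hlen
      have hidx := pvIdx_lt to_fill mn cnt l.length htf hlen hmn
      rw [pvIter, ih _ _ (by simpa using htf) (by simpa using hlen), pv_sum_set_bump _ _ hidx]
      push_cast; ring

theorem pvIter_getD (to_fill : List Nat) (mn : Nat)
    (hmn : to_fill ≠ [] → mn = to_fill.length) :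
    ∀ (k : Nat) (l : List Int) (cnt : Nat) (j : Nat),
      (∀ i ∈ to_fill, i < l.length) → 0 < l.length →
      (pvIter to_fill mn l cnt k).getD j 0 = l.getD j 0 + pvCount to_fill mn cnt k j := by
  intro k
  induction k with
  | zero => intro l cnt j _ _; rw [pvIter, pvCount]; ring
  | succ k ih =>
      intro l cnt j htf hlen
      have hidx := pvIdx_lt to_fill mn cnt l.length htf hlen hmn
      rw [pvIter, pvCount, ih _ _ _ (by simpa using htf) (by simpa using hlen)]
      by_cases hj : pvIdx to_fill mn cnt = j
      · rw [if_pos hj, ← hj, pv_getD_set_self _ _ _ hidx]; ring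
      · rw [if_neg hj, pv_getD_set_ne _ _ _ _ hj]; ring

theorem pvCount_back (to_fill : List Nat) (mn : Nat) :
    ∀ (k : Nat) (cnt j : Nat),
      pvCount to_fill mn cnt (k+1) j
        = pvCount to_fill mn cnt k j + (if pvIdx to_fill mn (cnt + k) = j then 1 else 0) := by
  intro k
  induction k with
  | zero => intro cnt j; rw [pvCount, pvCount, pvCount]; simp
  | succ k ih =>
      intro cnt j
      rw [pvCount, ih, pvCount]
      have : cnt + 1 + k = cnt + (k + 1) := by omega
      rw [this]; ring

theorem pvCount_notin (to_fill : List Nat) (mn : Nat) (j : Nat)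
    (hne : to_fill ≠ []) (hmn : mn = to_fill.length) (hj : j ∉ to_fill) :
    ∀ (k : Nat) (cnt : Nat), pvCount to_fill mn cnt k j = 0 := by
  intro k
  induction k with
  | zero => intro cnt; rw [pvCount]
  | succ k ih =>
      intro cnt
      rw [pvCount, ih]
      have hlt : cnt % mn < to_fill.length := by
        rw [hmn]; exact Nat.mod_lt _ (by cases to_fill with | nil => exact absurd rfl hne | cons a t => simp)
      have hmem : pvIdx to_fill mn cnt ∈ to_fill := by
        unfold pvIdx
        rw [if_pos hne, List.getD_eq_getElem _ 0 hlt]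
        exact List.getElem_mem hlt
      rw [if_neg (by intro hh; exact hj (hh ▸ hmem))]
      ring

theorem pvCount_closed (to_fill : List Nat) (hnd : to_fill.Nodup) (hne : to_fill ≠ [])
    (hm4 : to_fill.length ≤ 4) (j' : Nat) (hj' : j' < to_fill.length) :
    ∀ (k : Nat),
      pvCount to_fill to_fill.length 0 k (to_fill.getD j' 0)
        = ((k / to_fill.length : Nat) : Int) + (if j' < k % to_fill.length then 1 else 0) := by
  have hm0 : 0 < to_fill.length := by
    cases to_fill with | nil => exact absurd rfl hne | cons a t => simp
  intro k
  induction k with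
  | zero => rw [pvCount]; simp [Nat.zero_mod]
  | succ k ih =>
      rw [pvCount_back, ih]
      have hklt : k % to_fill.length < to_fill.length := Nat.mod_lt _ hm0
      have hidx : pvIdx to_fill to_fill.length (0 + k) = to_fill.getD (k % to_fill.length) 0 := by
        unfold pvIdx
        rw [if_pos hne, Nat.zero_add]
      rw [hidx]
      have hiff : (to_fill.getD (k % to_fill.length) 0 = to_fill.getD j' 0)
          ↔ (k % to_fill.length = j') := by
        rw [List.getD_eq_getElem _ 0 hklt, List.getD_eq_getElem _ 0 hj']
        exact hnd.getElem_inj_iff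
      by_cases hc : k % to_fill.length = j'
      · rw [if_pos (hiff.mpr hc)]
        obtain ⟨m, hm⟩ : ∃ m, to_fill.length = m := ⟨_, rfl⟩
        rw [hm] at hj' hm0 hm4 hc ⊢
        interval_cases m <;> (split_ifs <;> omega)
      · rw [if_neg (fun hh => hc (hiff.mp hh))]
        obtain ⟨m, hm⟩ : ∃ m, to_fill.length = m := ⟨_, rfl⟩
        rw [hm] at hj' hm0 hm4 hc ⊢
        interval_cases m <;> (split_ifs <;> omega)

theorem pvIter_nil (mn : Nat) :
    ∀ (k : Nat) (l : List Int) (cnt : Nat), 0 < l.length →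
      pvIter [] mn l cnt k = l.set 0 (l.getD 0 0 + k) := by
  intro k
  induction k with
  | zero => intro l cnt h; rw [pvIter]; push_cast; rw [add_zero, pv_set_self _ _ h]
  | succ k ih =>
      intro l cnt h
      have hidx : pvIdx [] mn cnt = 0 := by unfold pvIdx; simp
      rw [pvIter, hidx, ih _ _ (by simpa using h), pv_getD_set_self _ _ _ h, List.set_set]
      congr 1
      push_cast; ring

theorem pvLoop2_id (num_cards : Int) (fuel : Nat) (l : List Int) (h : ¬ num_cards < l.sum) :
    pvLoop2 num_cards fuel l = l := by
  cases fuel with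
  | zero => rw [pvLoop2]
  | succ f => rw [pvLoop2, if_neg h]

theorem pvLoop2_char (num_cards : Int) :
    ∀ (k : Nat) (l : List Int), l ≠ [] → l.sum = num_cards + k →
      pvLoop2 num_cards k l = l.set (l.length - 1) (l.getD (l.length - 1) 0 - k) := by
  intro k
  induction k with
  | zero =>
      intro l hne hsum
      rw [pvLoop2]
      push_cast; rw [sub_zero, pv_set_self]
      cases l with | nil => exact absurd rfl hne | cons a t => simp
  | succ k ih =>
      intro l hne hsum
      have hlen : l.length - 1 < l.length := by
        cases l with | nil => exact absurd rfl hne | cons a t => simp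
      rw [pvLoop2, if_pos (by push_cast at hsum; omega)]
      set l' := l.set (l.length - 1) (l.getD (l.length - 1) 0 - 1) with hl'
      have hlen' : l'.length = l.length := by rw [hl']; simp
      have hne' : l' ≠ [] := List.length_pos_iff.mp (by rw [hlen']; omega)
      rw [ih l' hne' (by rw [hl', pv_sum_set_drop _ _ hlen]; push_cast at hsum ⊢; omega)]
      rw [hlen', hl', pv_getD_set_self _ _ _ hlen, List.set_set]
      congr 1
      push_cast; ring

theorem pvDistribute_length (q r : Int) :
    ∀ (ps : List (Nat × Nat)) (l : List Int), (pvDistribute q r ps l).length = l.length := by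
  intro ps
  induction ps with
  | nil => intro l; rw [pvDistribute]
  | cons p rest ih =>
      intro l
      obtain ⟨i, j⟩ := p
      rw [pvDistribute, ih]; simp

theorem pvDistribute_getD (q r : Int) :
    ∀ (ps : List (Nat × Nat)) (l : List Int) (j : Nat), (∀ p ∈ ps, p.1 < l.length) →
      (pvDistribute q r ps l).getD j 0
        = l.getD j 0 + (ps.map (fun p => if p.1 = j then q + (if (p.2 : Int) < r then 1 else 0) else 0)).sum := by
  intro ps
  induction ps with
  | nil => intro l j _; rw [pvDistribute]; simp
  | cons p rest ih =>
      intro l j hv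
      obtain ⟨i, jj⟩ := p
      have hi : i < l.length := hv (i, jj) (by simp)
      rw [pvDistribute, ih _ _ (by intro p hp; simpa using hv p (by simp [hp]))]
      by_cases hij : i = j
      · subst hij; rw [pv_getD_set_self _ _ _ hi]; simp; ring
      · rw [pv_getD_set_ne _ _ _ _ hij]; simp [hij]

theorem pv_zip_sum_notin (q r : Int) (j : Nat) :
    ∀ (tf : List Nat) (s : Nat), j ∉ tf →
      ((tf.zipIdx s).map (fun p => if p.1 = j then q + (if (p.2 : Int) < r then 1 else 0) else 0)).sum = 0 := by
  intro tf
  induction tf with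
  | nil => intro s _; simp
  | cons a rest ih =>
      intro s hj
      rw [List.zipIdx_cons]
      simp only [List.map_cons, List.sum_cons]
      rw [if_neg (by intro hh; exact hj (by simp [hh])), ih (s+1) (by intro hh; exact hj (by simp [hh]))]
      ring

theorem pv_zip_sum_mem (q r : Int) :
    ∀ (tf : List Nat) (j' s : Nat), tf.Nodup → j' < tf.length →
      ((tf.zipIdx s).map (fun p => if p.1 = tf.getD j' 0 then q + (if (p.2 : Int) < r then 1 else 0) else 0)).sum
        = q + (if ((s + j' : Nat) : Int) < r then 1 else 0) := by
  intro tf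
  induction tf with
  | nil => intro j' s _ hj'; simp at hj'
  | cons a rest ih =>
      intro j' s hnd hj'
      have hna : a ∉ rest := (List.nodup_cons.mp hnd).1
      have hndr : rest.Nodup := (List.nodup_cons.mp hnd).2
      rw [List.zipIdx_cons]
      simp only [List.map_cons, List.sum_cons]
      cases j' with
      | zero =>
          have hd : (a :: rest).getD 0 0 = a := rfl
          rw [hd, if_pos rfl, pv_zip_sum_notin q r a rest (s+1) hna]
          simp
      | succ j'' =>
          have hd : (a :: rest).getD (j''+1) 0 = rest.getD j'' 0 := rfl
          have hj'' : j'' < rest.length := by simpa using hj'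
          have hmem : rest.getD j'' 0 ∈ rest := by
            rw [List.getD_eq_getElem _ 0 hj'']; exact List.getElem_mem hj''
          rw [hd, if_neg (by intro hh; exact hna (hh ▸ hmem)), ih j'' (s+1) hndr hj'']
          have : s + 1 + j'' = s + (j'' + 1) := by omega
          rw [this]; ring

theorem pv_fst_mem_zipIdx :
    ∀ (tf : List Nat) (s : Nat) (p : Nat × Nat), p ∈ tf.zipIdx s → p.1 ∈ tf := by
  intro tf
  induction tf with
  | nil => intro s p hp; simp [List.zipIdx] at hp
  | cons a rest ih =>
      intro s p hp
      rw [List.zipIdx_cons] at hp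
      rcases List.mem_cons.mp hp with h | h
      · simp [h]
      · exact List.mem_cons.mpr (Or.inr (ih (s+1) p h))

theorem fill_13_spec : Claim_equal_fill_13 := by
  intro suit_db num_cards _ hpre
  unfold Spec_fill_13 fill_13 fill_13_alt
  simp only []
  set l := suit_db.map (fun o => o.getD 0) with hl
  set tf := (List.range 4).filter (fun i => (suit_db.getD i none).isNone) with htfdef
  have hlen4 : 4 ≤ l.length := by rw [hl]; simpa using hpre
  have hlpos : 0 < l.length := by omega
  have hlne : l ≠ [] := by
    intro hh; rw [hh] at hlen4; simp at hlen4
  have htf : ∀ i ∈ tf, i < l.length := by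
    intro i hi
    rw [htfdef] at hi
    have := (List.mem_filter.mp hi).1
    have h4 : i < 4 := List.mem_range.mp this
    omega
  have hnd : tf.Nodup := List.Nodup.filter _ List.nodup_range
  have hm4 : tf.length ≤ 4 := by
    rw [htfdef]
    calc ((List.range 4).filter _).length ≤ (List.range 4).length := List.length_filter_le ..
    _ = 4 := by simp
  set mn := if tf.length ≠ 0 then tf.length else 4 with hmndef
  have hmn : tf ≠ [] → mn = tf.length := by
    intro hne
    rw [hmndef, if_pos (fun hh => hne (List.length_eq_zero_iff.mp hh))]
  by_cases h0 : l.sum < num_cards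
  · -- first loop runs; need = k > 0
    set k := (num_cards - l.sum).toNat with hk
    have hkpos : 0 < k := by omega
    have hsum : l.sum + k = num_cards := by omega
    rw [pvLoop1_eq_iter num_cards tf mn hmn k l 0 htf hlpos hsum]
    rw [pvLoop2_id _ _ _ (by rw [pvIter_sum tf mn hmn k l 0 htf hlpos]; omega)]
    rw [if_pos (by omega : (0:Int) < num_cards - l.sum)]
    by_cases htfe : tf = []
    · rw [if_neg (by simp [htfe])]
      rw [htfe, pvIter_nil mn k l 0 hlpos]
      congr 1
      omega
    · rw [if_pos htfe]
      have hneed : num_cards - l.sum = (k : Int) := by omega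
      have hq : PySem.Int.floordiv (num_cards - l.sum) (tf.length : Int) = ((k / tf.length : Nat) : Int) := by
        rw [hneed]; exact_mod_cast PySem.Int.floordiv_natCast k tf.length
      have hr : PySem.Int.mod (num_cards - l.sum) (tf.length : Int) = ((k % tf.length : Nat) : Int) := by
        rw [hneed]; exact_mod_cast PySem.Int.mod_natCast k tf.length
      have hmn' : mn = tf.length := hmn htfe
      apply List.ext_getElem
      · rw [pvIter_length, pvDistribute_length]
      · intro j hj1 hj2
        rw [← List.getD_eq_getElem _ 0 hj1, ← List.getD_eq_getElem _ 0 hj2]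
        rw [pvIter_getD tf mn hmn k l 0 j htf hlpos]
        rw [pvDistribute_getD _ _ tf.zipIdx l j
          (fun p hp => htf p.1 (pv_fst_mem_zipIdx tf 0 p hp))]
        congr 1
        by_cases hjm : j ∈ tf
        · obtain ⟨j', hj', hgd⟩ : ∃ j', j' < tf.length ∧ tf.getD j' 0 = j := by
            obtain ⟨n, hn, he⟩ := List.getElem_of_mem hjm
            exact ⟨n, hn, by rw [List.getD_eq_getElem _ 0 hn]; exact he⟩
          rw [← hgd, hmn', pvCount_closed tf hnd htfe hm4 j' hj' k]
          rw [hq, hr, pv_zip_sum_mem _ _ tf j' 0 hnd hj']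
          congr 1
          simp only [Nat.zero_add]
          have hcast : ((j' : Int) < ((k % tf.length : Nat) : Int)) ↔ j' < k % tf.length :=
            Nat.cast_lt
          by_cases hc : j' < k % tf.length
          · rw [if_pos hc, if_pos (hcast.mpr hc)]
          · rw [if_neg hc, if_neg (fun hh => hc (hcast.mp hh))]
        · rw [hmn', pvCount_notin tf tf.length j htfe rfl hjm k,
            pv_zip_sum_notin _ _ j tf 0 hjm]
  · -- first loop does not run
    have h00 : (num_cards - l.sum).toNat = 0 := by omega
    rw [h00, pvLoop1]
    rw [if_neg (by omega : ¬ (0:Int) < num_cards - l.sum)]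
    by_cases hgt : num_cards < l.sum
    · set k := (l.sum - num_cards).toNat with hk
      have hsum : l.sum = num_cards + k := by omega
      rw [pvLoop2_char num_cards k l hlne hsum]
      rw [if_pos (by omega : num_cards - l.sum < 0)]
      congr 1
      omega
    · rw [pvLoop2_id _ _ _ hgt, if_neg (by omega : ¬ num_cards - l.sum < 0)]
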